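-- pv_equiv track=rewrite | github.com/anyateh/fyp | tests/http/tcp_http_test.py | is_http_in_header
-- ===== SOURCE A (Python) =====
-- def _find_seq_index(bytes_list:list[int], seq:list[int]) -> int:
-- 	seq_len = len(seq)
-- 	seq_pos = 0
-- 	for potential_patt in (bytes_list[i:i + seq_len] for i in range(len(bytes_list) - seq_len + 1)):
-- 		if potential_patt == seq:
-- 			return seq_pos
-- 		seq_pos += 1
--
-- 	return -1
--
-- def is_http_in_header(http_req:list[int]) -> bool:
-- 	first_crlf = _find_seq_index(http_req, [13, 10])
-- 	if first_crlf < 4: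
-- 		return False
--
-- 	for segment in (http_req[i:i + 4] for i in range(len(http_req[:first_crlf]) - 3)):
-- 		if segment == list(b'HTTP'):
-- 			return True
--
-- 	return False
-- ===== SOURCE B (Python) =====
-- def is_http_in_header(http_req: list[int]) -> bool:
-- 	first_crlf = None
-- 	http_pos = None
-- 	n = len(http_req)
-- 	for i in range(n - 1):
-- 		if http_req[i] == 13 and http_req[i + 1] == 10:
-- 			first_crlf = i
-- 			break
-- 		if http_pos is None and http_req[i:i + 4] == [72, 84, 84, 80]:
-- 			http_pos = i
-- 	return (first_crlf is not None and first_crlf >= 4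
-- 		and http_pos is not None and http_pos + 4 <= first_crlf)
-- ===== Notes on version B (the rewrite author's own statement) =====
-- stated objective: alternative
-- what changed: Replaces A's two sequential scans (a generic subsequence-finder for CRLF, then a second slice scan for 'HTTP') by one interleaved forward pass that breaks at the first CRLF while recording the first 'HTTP' position, then checks the positions arithmetically.
import Mathlib
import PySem

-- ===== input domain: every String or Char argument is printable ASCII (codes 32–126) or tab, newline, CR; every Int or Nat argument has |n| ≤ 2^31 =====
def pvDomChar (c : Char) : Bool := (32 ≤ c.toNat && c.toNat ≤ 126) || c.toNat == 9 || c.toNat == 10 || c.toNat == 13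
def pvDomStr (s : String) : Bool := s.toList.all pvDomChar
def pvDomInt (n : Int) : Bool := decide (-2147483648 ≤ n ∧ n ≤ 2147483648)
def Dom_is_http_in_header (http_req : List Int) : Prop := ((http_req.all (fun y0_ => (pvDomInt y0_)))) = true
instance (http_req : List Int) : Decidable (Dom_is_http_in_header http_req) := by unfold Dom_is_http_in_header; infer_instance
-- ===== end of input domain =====

-- B replaces A's two sequential scans by a single interleaved pass (break at first CRLF,
-- record first 'HTTP' position) followed by an arithmetic check: an alternative of equal cost.

-- ===== PORT A =====
-- loop of _find_seq_index: walks the index list, comparing the slice at each index with seq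
def findSeqIndexLoop (bytes_list seq : List Int) (idxs : List Int) (seq_pos : Int) : Int :=
  match idxs with
  | [] => -1
  | i :: rest =>
    if PySem.List.slice bytes_list (some i) (some (i + (seq.length : Int))) = seq then seq_pos
    else findSeqIndexLoop bytes_list seq rest (seq_pos + 1)

def pyFindSeqIndex (bytes_list seq : List Int) : Int :=
  findSeqIndexLoop bytes_list seq
    (PySem.List.pyRange 0 ((bytes_list.length : Int) - (seq.length : Int) + 1) 1) 0

-- second loop of A: for i in range(...): if http_req[i:i+4] == list(b'HTTP'): return True
def httpScanLoop (http_req : List Int) (idxs : List Int) : Bool :=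
  match idxs with
  | [] => false
  | i :: rest =>
    if PySem.List.slice http_req (some i) (some (i + 4)) = [72, 84, 84, 80] then true
    else httpScanLoop http_req rest

def is_http_in_header (http_req : List Int) : Bool :=
  let first_crlf := pyFindSeqIndex http_req [13, 10]
  if first_crlf < 4 then false
  else
    httpScanLoop http_req
      (PySem.List.pyRange 0
        (((PySem.List.slice http_req none (some first_crlf)).length : Int) - 3) 1)

-- ===== PORT B =====
-- the single pass of Source B: break at the first CRLF, meanwhile record the first 'HTTP' index
def altLoop (http_req : List Int) (idxs : List Int) (http_pos : Option Int) :
    Option Int × Option Int :=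
  match idxs with
  | [] => (none, http_pos)
  | i :: rest =>
    if PySem.List.pyGet? http_req i = some 13 ∧ PySem.List.pyGet? http_req (i + 1) = some 10 then
      (some i, http_pos)
    else if http_pos = none ∧ PySem.List.slice http_req (some i) (some (i + 4)) = [72, 84, 84, 80] then
      altLoop http_req rest (some i)
    else altLoop http_req rest http_pos

def is_http_in_header_alt (http_req : List Int) : Bool :=
  let n : Int := (http_req.length : Int)
  let r := altLoop http_req (PySem.List.pyRange 0 (n - 1) 1) none
  match r.1, r.2 with
  | some fc, some hp => decide (4 ≤ fc) && decide (hp + 4 ≤ fc)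
  | _, _ => false

-- ===== PRECONDITION & SPEC =====
def Spec_is_http_in_header (http_req : List Int) (out : Bool) : Prop := out = is_http_in_header_alt http_req
instance (http_req : List Int) (out : Bool) : Decidable (Spec_is_http_in_header http_req out) := by unfold Spec_is_http_in_header; infer_instance

-- ===== CLAIM (what is proved, stated in full; the proofs are below) =====
def Claim_equal_is_http_in_header : Prop := ∀ (http_req : List Int), Dom_is_http_in_header http_req → Spec_is_http_in_header http_req (is_http_in_header http_req)

-- ===== LEMMAS AND PROOFS =====

-- first index (if any) whose 2-byte window is CRLF
def fCRLF : List Int → Option Nat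
  | [] => none
  | x :: rest =>
    if (x :: rest).take 2 = [13, 10] then some 0 else (fCRLF rest).map (· + 1)

-- first index (if any) whose 4-byte window is 'HTTP'
def fHTTP : List Int → Option Nat
  | [] => none
  | x :: rest =>
    if (x :: rest).take 4 = [72, 84, 84, 80] then some 0 else (fHTTP rest).map (· + 1)

lemma fCRLF_short (xs : List Int) (h : xs.length ≤ 1) : fCRLF xs = none := by
  match xs with
  | [] => rfl
  | [x] => simp [fCRLF]
  | x :: y :: r => simp at h

lemma fCRLF_le (xs : List Int) (k : Nat) (h : fCRLF xs = some k) : k + 2 ≤ xs.length := by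
  induction xs generalizing k with
  | nil => simp [fCRLF] at h
  | cons x rest ih =>
    rw [fCRLF] at h
    split at h
    · rename_i ht
      injection h with hk
      subst hk
      have := congrArg List.length ht
      simp at this ⊢
      omega
    · obtain ⟨k', hk', rfl⟩ := Option.map_eq_some_iff.mp h
      have := ih k' hk'
      simp only [List.length_cons]
      omega

lemma fHTTP_le (xs : List Int) (k : Nat) (h : fHTTP xs = some k) : k + 4 ≤ xs.length := by
  induction xs generalizing k with
  | nil => simp [fHTTP] at h
  | cons x rest ih =>
    rw [fHTTP] at h
    split at h
    · rename_i ht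
      injection h with hk
      subst hk
      have := congrArg List.length ht
      simp at this ⊢
      omega
    · obtain ⟨k', hk', rfl⟩ := Option.map_eq_some_iff.mp h
      have := ih k' hk'
      simp only [List.length_cons]
      omega

-- A's find loop computes the first CRLF position
lemma findLoop_eq (cs : List Int) :
    ∀ (d a : Nat) (p : Int), cs.length ≤ a + d →
    findSeqIndexLoop cs [13, 10] (PySem.List.pyRange (a : Int) ((cs.length : Int) - 1) 1) p
      = (match fCRLF (cs.drop a) with | some k => p + k | none => -1) := by
  intro d
  induction d with
  | zero =>
    intro a p h
    rw [PySem.List.pyRange_one_eq_nil (by omega)]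
    rw [List.drop_eq_nil_of_le (by omega)]
    rfl
  | succ d ih =>
    intro a p h
    by_cases hlt : (a : Int) < (cs.length : Int) - 1
    · have ha2 : a + 2 ≤ cs.length := by omega
      rw [PySem.List.pyRange_one_cons hlt]
      rw [findSeqIndexLoop]
      have hsl : PySem.List.slice cs (some (a : Int)) (some ((a : Int) + ((2 : Nat) : Int)))
          = (cs.drop a).take 2 := PySem.List.slice_natCast_add cs a 2
      norm_num at hsl
      rw [show ((List.length [(13 : Int), 10] : Int)) = 2 by rfl, hsl]
      rw [List.drop_eq_getElem_cons (show a < cs.length by omega), fCRLF,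
        ← List.drop_eq_getElem_cons (show a < cs.length by omega)]
      by_cases hc : (cs.drop a).take 2 = [13, 10]
      · simp [hc]
      · rw [if_neg hc, if_neg hc]
        rw [show (a : Int) + 1 = ((a + 1 : Nat) : Int) by push_cast; ring]
        rw [ih (a + 1) (p + 1) (by omega)]
        cases hk : fCRLF (cs.drop (a + 1)) with
        | none => simp
        | some k => simp; ring
    · rw [PySem.List.pyRange_one_eq_nil (by omega)]
      rw [fCRLF_short (cs.drop a) (by simp; omega)]
      rfl

-- past the end of the list every 4-slice is empty, so the scan loop never matches
lemma scanLoop_empty (cs : List Int) (m : Int) :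
    ∀ (g : Nat) (a : Int), (m - a).toNat ≤ g → (cs.length : Int) ≤ a →
    httpScanLoop cs (PySem.List.pyRange a m 1) = false := by
  intro g
  induction g with
  | zero =>
    intro a hg ha
    rw [PySem.List.pyRange_one_eq_nil (by omega)]
    rfl
  | succ g ih =>
    intro a hg ha
    by_cases hm : a < m
    · rw [PySem.List.pyRange_one_cons hm, httpScanLoop]
      have hsl : PySem.List.slice cs (some a) (some (a + 4)) = [] := by
        rw [PySem.List.slice_toNat cs (by omega) (by omega)]
        rw [List.drop_eq_nil_of_le (by omega)]
        simp
      rw [hsl, if_neg (by simp)]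
      exact ih (a + 1) (by omega) (by omega)
    · rw [PySem.List.pyRange_one_eq_nil (by omega)]
      rfl

-- A's scan loop checks whether the first 'HTTP' position lies below the bound
lemma scanLoop_eq (cs : List Int) (m : Int) :
    ∀ (d a : Nat), cs.length ≤ a + d →
    httpScanLoop cs (PySem.List.pyRange (a : Int) m 1)
      = (match fHTTP (cs.drop a) with
         | some k => decide (((a + k : Nat) : Int) < m)
         | none => false) := by
  intro d
  induction d with
  | zero =>
    intro a h
    rw [List.drop_eq_nil_of_le (by omega)]
    rw [scanLoop_empty cs m (m - (a : Int)).toNat (a : Int) (by omega) (by omega)]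
    rfl
  | succ d ih =>
    intro a h
    by_cases ha : a < cs.length
    · by_cases hm : (a : Int) < m
      · rw [PySem.List.pyRange_one_cons hm, httpScanLoop]
        have hsl := PySem.List.slice_natCast_add cs a 4
        norm_num at hsl
        rw [hsl]
        rw [List.drop_eq_getElem_cons ha, fHTTP, ← List.drop_eq_getElem_cons ha]
        by_cases hc : (cs.drop a).take 4 = [72, 84, 84, 80]
        · simp [hc, hm]
        · rw [if_neg hc, if_neg hc]
          rw [show (a : Int) + 1 = ((a + 1 : Nat) : Int) by push_cast; ring]
          rw [ih (a + 1) (by omega)]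
          cases hk : fHTTP (cs.drop (a + 1)) with
          | none => simp
          | some k =>
            simp only [Option.map_some]
            congr 1
            push_cast
            ring_nf
      · rw [PySem.List.pyRange_one_eq_nil (by omega)]
        cases hk : fHTTP (cs.drop a) with
        | none => rfl
        | some k =>
          rw [httpScanLoop]
          symm
          simp
          omega
    · rw [List.drop_eq_nil_of_le (by omega)]
      rw [scanLoop_empty cs m (m - (a : Int)).toNat (a : Int) (by omega) (by omega)]
      rfl

lemma take2_pair (cs : List Int) (a : Nat) (h : a + 1 < cs.length) :
    (cs.drop a).take 2 = [cs[a], cs[a + 1]] := by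
  rw [List.drop_eq_getElem_cons (show a < cs.length by omega),
    List.drop_eq_getElem_cons (show a + 1 < cs.length from h)]
  rfl

-- the elementwise CRLF test of Source B seen as a 2-slice test
lemma crlf_iff (cs : List Int) (a : Nat) (h : a + 1 < cs.length) :
    (PySem.List.pyGet? cs (a : Int) = some 13 ∧ PySem.List.pyGet? cs ((a : Int) + 1) = some 10)
      ↔ (cs.drop a).take 2 = [13, 10] := by
  rw [take2_pair cs a h, PySem.List.pyGet?_ofNat cs a (by omega),
    show ((a : Int) + 1) = ((a + 1 : Nat) : Int) by push_cast; ring,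
    PySem.List.pyGet?_ofNat cs (a + 1) h]
  simp

-- B's single pass yields the first CRLF and the first 'HTTP' strictly before it
lemma altLoop_eq (cs : List Int) :
    ∀ (d a : Nat) (hp : Option Int), cs.length ≤ a + d →
    altLoop cs (PySem.List.pyRange (a : Int) ((cs.length : Int) - 1) 1) hp
      = (match fCRLF (cs.drop a) with
         | some k =>
           (some ((a + k : Nat) : Int),
            match hp with
            | some h => some h
            | none => (fHTTP (cs.drop a)).bind
                (fun j => if j < k then some ((a + j : Nat) : Int) else none))
         | none =>
           (none,
            match hp with
            | some h => some h
            | none => (fHTTP (cs.drop a)).map (fun j => ((a + j : Nat) : Int)))) := by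
  intro d
  induction d with
  | zero =>
    intro a hp h
    rw [PySem.List.pyRange_one_eq_nil (by omega), List.drop_eq_nil_of_le (by omega)]
    cases hp <;> rfl
  | succ d ih =>
    intro a hp h
    by_cases hlt : (a : Int) < (cs.length : Int) - 1
    · have ha : a < cs.length := by omega
      rw [PySem.List.pyRange_one_cons hlt, altLoop]
      have hfc : fCRLF (cs.drop a)
          = if (cs.drop a).take 2 = [13, 10] then some 0
            else (fCRLF (cs.drop (a + 1))).map (· + 1) := by
        rw [List.drop_eq_getElem_cons ha, fCRLF, ← List.drop_eq_getElem_cons ha]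
      have hfh : fHTTP (cs.drop a)
          = if (cs.drop a).take 4 = [72, 84, 84, 80] then some 0
            else (fHTTP (cs.drop (a + 1))).map (· + 1) := by
        rw [List.drop_eq_getElem_cons ha, fHTTP, ← List.drop_eq_getElem_cons ha]
      have hsl := PySem.List.slice_natCast_add cs a 4
      norm_num at hsl
      have hcast : (a : Int) + 1 = ((a + 1 : Nat) : Int) := by push_cast; ring
      by_cases hc : (cs.drop a).take 2 = [13, 10]
      · rw [if_pos ((crlf_iff cs a (by omega)).mpr hc), hfc, if_pos hc]
        cases hp with
        | some h0 => simp
        | none =>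
          cases fHTTP (cs.drop a) <;> simp
      · rw [if_neg (fun hcon => hc ((crlf_iff cs a (by omega)).mp hcon)), hfc, if_neg hc]
        cases hp with
        | some h0 =>
          rw [if_neg (by simp), hcast, ih (a + 1) (some h0) (by omega)]
          cases hk : fCRLF (cs.drop (a + 1)) with
          | none => simp
          | some k => simp; ring
        | none =>
          by_cases hc4 : (cs.drop a).take 4 = [72, 84, 84, 80]
          · rw [if_pos ⟨rfl, by rw [hsl]; exact hc4⟩, hcast,
              ih (a + 1) (some ((a : Nat) : Int)) (by omega), hfh, if_pos hc4]
            cases hk : fCRLF (cs.drop (a + 1)) with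
            | none => simp
            | some k => simp; ring
          · rw [if_neg (by intro hcon; exact hc4 (by rw [← hsl]; exact hcon.2)), hcast,
              ih (a + 1) none (by omega), hfh, if_neg hc4]
            cases hk : fCRLF (cs.drop (a + 1)) with
            | none =>
              cases hj : fHTTP (cs.drop (a + 1)) with
              | none => simp
              | some j => simp; omega
            | some k =>
              cases hj : fHTTP (cs.drop (a + 1)) with
              | none => simp; omega
              | some j =>
                simp only [Option.map_some, Option.bind_some, Prod.mk.injEq]
                refine ⟨by simp; omega, ?_⟩
                by_cases hjk : j < k
                · rw [if_pos (show j + 1 < k + 1 by omega), if_pos hjk]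
                  simp
                  omega
                · rw [if_neg (show ¬(j + 1 < k + 1) by omega), if_neg hjk]
    · rw [PySem.List.pyRange_one_eq_nil (by omega)]
      have h1 : (cs.drop a).length ≤ 1 := by simp; omega
      have hfc : fCRLF (cs.drop a) = none := fCRLF_short _ h1
      have hfh : fHTTP (cs.drop a) = none := by
        cases hj : fHTTP (cs.drop a) with
        | none => rfl
        | some j => have := fHTTP_le _ _ hj; omega
      rw [hfc, hfh]
      cases hp <;> rfl

-- ===== VERDICT (by name: the statement is the Claim_ definition above) =====
-- characterizations of the two ports at the top level
lemma portA_eq (cs : List Int) :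
    is_http_in_header cs
      = (match fCRLF cs, fHTTP cs with
         | some k, some h => if (k : Int) < 4 then false else decide ((h : Int) < (k : Int) - 3)
         | _, _ => false) := by
  have hA : pyFindSeqIndex cs [13, 10]
      = (match fCRLF cs with | some k => (k : Int) | none => -1) := by
    rw [pyFindSeqIndex,
      show ((cs.length : Int) - (List.length [(13 : Int), 10] : Int) + 1)
        = (cs.length : Int) - 1 by simp; ring,
      show (0 : Int) = ((0 : Nat) : Int) by simp,
      findLoop_eq cs cs.length 0 (((0 : Nat)) : Int) (by omega)]
    simp
  rw [is_http_in_header]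
  simp only [hA]
  cases hfc : fCRLF cs with
  | none => rfl
  | some k =>
    have hk2 := fCRLF_le cs k hfc
    by_cases h4 : (k : Int) < 4
    · rw [if_pos h4]
      cases fHTTP cs with
      | none => rfl
      | some h => simp [h4]
    · rw [if_neg h4]
      have hm : ((PySem.List.slice cs none (some (k : Int))).length : Int) = (k : Int) := by
        rw [PySem.List.slice_to cs (by omega)]
        simp
        omega
      rw [hm, show (0 : Int) = ((0 : Nat) : Int) by simp,
        scanLoop_eq cs ((k : Int) - 3) cs.length 0 (by omega)]
      simp only [List.drop_zero]
      cases hfh : fHTTP cs with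
      | none => rfl
      | some h => simp [h4]

lemma portB_eq (cs : List Int) :
    is_http_in_header_alt cs
      = (match fCRLF cs, fHTTP cs with
         | some k, some h =>
           if h < k then decide (4 ≤ (k : Int)) && decide ((h : Int) + 4 ≤ (k : Int)) else false
         | _, _ => false) := by
  rw [is_http_in_header_alt]
  simp only [show (0 : Int) = ((0 : Nat) : Int) by simp]
  rw [altLoop_eq cs cs.length 0 none (by omega)]
  simp only [List.drop_zero, Nat.zero_add]
  cases hfc : fCRLF cs with
  | none => cases hfh : fHTTP cs <;> rfl
  | some k =>
    cases hfh : fHTTP cs with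
    | none => rfl
    | some h =>
      by_cases hhk : h < k
      · simp [hhk]
      · simp [hhk]

theorem is_http_in_header_spec : Claim_equal_is_http_in_header := by
  intro cs _hdom
  unfold Spec_is_http_in_header
  rw [portA_eq, portB_eq]
  cases hfc : fCRLF cs with
  | none => rfl
  | some k =>
    cases hfh : fHTTP cs with
    | none => rfl
    | some h =>
      show (if (k : Int) < 4 then false else decide ((h : Int) < (k : Int) - 3))
          = (if h < k then decide (4 ≤ (k : Int)) && decide ((h : Int) + 4 ≤ (k : Int)) else false)
      by_cases hhk : h < k
      · rw [if_pos hhk]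
        by_cases h4 : (k : Int) < 4
        · rw [if_pos h4]
          symm
          simp
          omega
        · rw [if_neg h4, ← Bool.decide_and, decide_eq_decide]
          constructor <;> (intro; omega)
      · rw [if_neg hhk]
        by_cases h4 : (k : Int) < 4
        · rw [if_pos h4]
        · rw [if_neg h4]
          simp
          omega
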